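-- pv_equiv track=rewrite | github.com/tannerpolley/Unite_Builds | scripts/Extra_Functions.py | fix_scyther_and_urshifu
-- ===== SOURCE A (Python) =====
-- def fix_scyther_and_urshifu(movesets):
--
--     indices = []
--     for i, d in enumerate(movesets):
--         if d['Name'] == 'Scizor':
--             if d["Move 1"].split('-')[-1] == " Dual Wingbeat.png":
--                 indices.append(i)
--     for i in indices:
--         Pokemon_name = 'Scyther'
--         movesets[i]['Name'] = Pokemon_name
--         movesets[i]['Role'] = 'Speedster'
--         movesets[i]['Pokemon'] = 'Pokemon/' + Pokemon_name + '.png'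
--         movesets[i]['Move 1'] = 'Moves/' + Pokemon_name + ' - ' + "Dual Wingbeat" + '.png'
--         movesets[i]['Move 2'] = 'Moves/' + Pokemon_name + ' -' + movesets[i]['Move 2'].split('-')[-1]
--
--     for i, d in enumerate(movesets):
--         if d['Name'] == 'Urshifu':
--             if d["Move 1"].split('-')[-1] == " Surging Strikes.png":
--                 movesets[i]['Pokemon'] = 'Pokemon/' + 'Urshifu_Rapid' + '.png'
--             elif d["Move 1"].split('-')[-1] == " Wicked Blow.png":
--                 movesets[i]['Pokemon'] = 'Pokemon/' + 'Urshifu_Single' + '.png'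
--             else:
--                 continue
--
--     return movesets
-- ===== SOURCE B (Python) =====
-- def _scyther_patch(d):
--     return {'Name': 'Scyther', 'Role': 'Speedster', 'Pokemon': 'Pokemon/Scyther.png',
--             'Move 1': 'Moves/Scyther - Dual Wingbeat.png',
--             'Move 2': 'Moves/Scyther -' + d['Move 2'].split('-')[-1]}
--
-- # rule table: (Name, last '-'-segment of Move 1) -> patch constructor
-- RULES = {
--     ('Scizor', ' Dual Wingbeat.png'): _scyther_patch,
--     ('Urshifu', ' Surging Strikes.png'): lambda d: {'Pokemon': 'Pokemon/Urshifu_Rapid.png'},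
--     ('Urshifu', ' Wicked Blow.png'): lambda d: {'Pokemon': 'Pokemon/Urshifu_Single.png'},
-- }
--
-- def fix_scyther_and_urshifu(movesets):
--     # table-driven dispatch: look the record's (Name, Move-1 tail) up in RULES
--     # and merge the rule's patch dict into the record; no conditional chain.
--     for d in movesets:
--         rule = RULES.get((d['Name'], d.get('Move 1', '').split('-')[-1]))
--         if rule:
--             d.update(rule(d))
--     return movesets
-- ===== Notes on version B (the rewrite author's own statement) =====
-- stated objective: alternative
-- what changed: Replaced A's three passes with conditional chains (collect Scizor indices into an accumulator, apply rewrites by index, then a third enumerate scan for Urshifu) by a table-driven rewrite: a RULES dict keyed by (Name, Move-1 tail) is built once, and one loop looks each record up in it and merges the rule's patch dict via d.update, eliminating both the accumulator and all if/elif dispatch.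
import Mathlib
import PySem

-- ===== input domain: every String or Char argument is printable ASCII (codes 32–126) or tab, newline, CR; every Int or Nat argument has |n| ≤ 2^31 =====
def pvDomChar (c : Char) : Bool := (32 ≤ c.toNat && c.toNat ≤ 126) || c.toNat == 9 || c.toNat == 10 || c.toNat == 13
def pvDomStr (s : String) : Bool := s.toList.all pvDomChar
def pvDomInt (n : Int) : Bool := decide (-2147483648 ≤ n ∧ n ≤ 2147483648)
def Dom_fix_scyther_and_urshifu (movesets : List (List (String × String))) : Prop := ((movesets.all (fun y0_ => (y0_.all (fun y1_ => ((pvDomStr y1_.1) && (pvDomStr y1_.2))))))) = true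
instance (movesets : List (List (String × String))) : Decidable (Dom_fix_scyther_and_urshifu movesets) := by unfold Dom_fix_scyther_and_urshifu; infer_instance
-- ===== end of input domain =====

-- A three-pass in-place patcher (collect indices, apply, second scan) re-implemented as a
-- table-driven rewrite: a rule dict keyed by (Name, Move-1 tail) replaces the conditional
-- chains (objective: alternative). Python A and B mutate the argument's dicts in place; the
-- equivalence proved here is about the RETURN value (B performs the same mutation).


-- shared helper: s.split('-')[-1]  (splitOn always returns a nonempty list, so [-1] never raises)
def lastSeg (s : String) : String := PySem.List.pyGetD ((PySem.Str.split? s "-").getD []) (-1) ""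

-- ===== PORT A =====
-- the body of A's middle loop: the five sequential dict assignments to movesets[i]
def scyRw (d : PySem.Dict String String) : PySem.Dict String String :=
  let d1 := d.insert "Name" "Scyther"
  let d2 := d1.insert "Role" "Speedster"
  let d3 := d2.insert "Pokemon" ("Pokemon/" ++ "Scyther" ++ ".png")
  let d4 := d3.insert "Move 1" ("Moves/" ++ "Scyther" ++ " - " ++ "Dual Wingbeat" ++ ".png")
  d4.insert "Move 2" ("Moves/" ++ "Scyther" ++ " -" ++ lastSeg (d4.getD "Move 2" ""))

-- dicts travel as association lists; each is read as a Python dict via PySem.Dict.ofList and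
-- returned as its items.  d['k'] (a raising lookup) is ported as getD _ "" ; Pre_ excludes the
-- KeyError inputs.  List mutation movesets[i] is modelled by List.set on the state list.
def fix_scyther_and_urshifu (movesets : List (List (String × String))) : List (List (String × String)) :=
  let ms : List (PySem.Dict String String) := movesets.map PySem.Dict.ofList
  let indices : List Int :=
    (PySem.List.enumerate ms 0).foldl (fun acc p =>
      if p.2.getD "Name" "" == "Scizor" then
        if lastSeg (p.2.getD "Move 1" "") == " Dual Wingbeat.png" then acc ++ [p.1] else acc
      else acc) []
  let ms2 :=
    indices.foldl (fun cur i =>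
      cur.set i.toNat (scyRw ((PySem.List.pyGet? cur i).getD PySem.Dict.empty))) ms
  let ms3 :=
    (PySem.List.enumerate ms2 0).foldl (fun cur p =>
      if p.2.getD "Name" "" == "Urshifu" then
        if lastSeg (p.2.getD "Move 1" "") == " Surging Strikes.png" then
          cur.set p.1.toNat (p.2.insert "Pokemon" ("Pokemon/" ++ "Urshifu_Rapid" ++ ".png"))
        else if lastSeg (p.2.getD "Move 1" "") == " Wicked Blow.png" then
          cur.set p.1.toNat (p.2.insert "Pokemon" ("Pokemon/" ++ "Urshifu_Single" ++ ".png"))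
        else cur
      else cur) ms2
  ms3.map (·.items)

-- ===== PORT B =====
-- Source B's _scyther_patch: the patch dict built for a matching Scizor record
def scytherPatch (d : PySem.Dict String String) : List (String × String) :=
  [("Name", "Scyther"), ("Role", "Speedster"), ("Pokemon", "Pokemon/Scyther.png"),
   ("Move 1", "Moves/Scyther - Dual Wingbeat.png"),
   ("Move 2", "Moves/Scyther -" ++ lastSeg (d.getD "Move 2" ""))]

-- Source B's RULES table: (Name, Move-1 tail) ↦ patch constructor
def rulesDict : PySem.Dict (String × String) (PySem.Dict String String → List (String × String)) :=
  PySem.Dict.ofList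
    [(("Scizor", " Dual Wingbeat.png"), scytherPatch),
     (("Urshifu", " Surging Strikes.png"), fun _ => [("Pokemon", "Pokemon/Urshifu_Rapid.png")]),
     (("Urshifu", " Wicked Blow.png"), fun _ => [("Pokemon", "Pokemon/Urshifu_Single.png")])]

-- the loop body: RULES.get((d['Name'], d.get('Move 1','').split('-')[-1])); d.update(rule(d))
def bApply (d : PySem.Dict String String) : PySem.Dict String String :=
  match rulesDict.get? (d.getD "Name" "", lastSeg (d.getD "Move 1" "")) with
  | none => d
  | some rule => (rule d).foldl (fun c p => c.insert p.1 p.2) d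

def fix_scyther_and_urshifu_alt (movesets : List (List (String × String))) : List (List (String × String)) :=
  movesets.map (fun l => (bApply (PySem.Dict.ofList l)).items)

-- ===== PRECONDITION & SPEC =====
-- Pre_ excludes exactly the inputs where Python A raises KeyError: a record without 'Name'; a
-- Scizor/Urshifu record without 'Move 1'; a matching Scizor record without 'Move 2'.
def Pre_fix_scyther_and_urshifu (movesets : List (List (String × String))) : Prop :=
  ∀ l ∈ movesets,
    (PySem.Dict.ofList l : PySem.Dict String String).contains "Name" = true ∧
    (((PySem.Dict.ofList l : PySem.Dict String String).getD "Name" "" = "Scizor" ∨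
      (PySem.Dict.ofList l : PySem.Dict String String).getD "Name" "" = "Urshifu") →
      (PySem.Dict.ofList l : PySem.Dict String String).contains "Move 1" = true) ∧
    ((PySem.Dict.ofList l : PySem.Dict String String).getD "Name" "" = "Scizor" →
      lastSeg ((PySem.Dict.ofList l : PySem.Dict String String).getD "Move 1" "") = " Dual Wingbeat.png" →
      (PySem.Dict.ofList l : PySem.Dict String String).contains "Move 2" = true)
instance (movesets : List (List (String × String))) : Decidable (Pre_fix_scyther_and_urshifu movesets) := by unfold Pre_fix_scyther_and_urshifu; infer_instance

def pvWitness_fix_scyther_and_urshifu : (List (List (String × String))) :=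
  [[("Name", "Scizor"), ("Role", "All-Rounder"), ("Pokemon", "Pokemon/Scizor.png"),
    ("Move 1", "Moves/Scizor - Dual Wingbeat.png"), ("Move 2", "Moves/Scizor - Bullet Punch.png")],
   [("Name", "Urshifu"), ("Move 1", "Moves/Urshifu - Wicked Blow.png")],
   [("Name", "Pikachu")]]

def Spec_fix_scyther_and_urshifu (movesets : List (List (String × String))) (out : List (List (String × String))) : Prop := out = fix_scyther_and_urshifu_alt movesets
instance (movesets : List (List (String × String))) (out : List (List (String × String))) : Decidable (Spec_fix_scyther_and_urshifu movesets out) := by unfold Spec_fix_scyther_and_urshifu; infer_instance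

-- ===== CLAIM (what is proved, stated in full; the proofs are below) =====
def Claim_equal_fix_scyther_and_urshifu : Prop := ∀ (movesets : List (List (String × String))), Dom_fix_scyther_and_urshifu movesets → Pre_fix_scyther_and_urshifu movesets → Spec_fix_scyther_and_urshifu movesets (fix_scyther_and_urshifu movesets)

-- ===== LEMMAS AND PROOFS =====

-- the Scizor test and the two per-record update functions of A, named for the proofs
def cond1 (d : PySem.Dict String String) : Bool :=
  d.getD "Name" "" == "Scizor" && (lastSeg (d.getD "Move 1" "") == " Dual Wingbeat.png")

def f1 (d : PySem.Dict String String) : PySem.Dict String String :=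
  if cond1 d then scyRw d else d

def f2 (d : PySem.Dict String String) : PySem.Dict String String :=
  if d.getD "Name" "" == "Urshifu" then
    if lastSeg (d.getD "Move 1" "") == " Surging Strikes.png" then
      d.insert "Pokemon" ("Pokemon/" ++ "Urshifu_Rapid" ++ ".png")
    else if lastSeg (d.getD "Move 1" "") == " Wicked Blow.png" then
      d.insert "Pokemon" ("Pokemon/" ++ "Urshifu_Single" ++ ".png")
    else d
  else d

theorem indices_closed (ms : List (PySem.Dict String String)) (acc : List Int) (s : Int) :
    (PySem.List.enumerate ms s).foldl (fun acc p =>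
      if p.2.getD "Name" "" == "Scizor" then
        if lastSeg (p.2.getD "Move 1" "") == " Dual Wingbeat.png" then acc ++ [p.1] else acc
      else acc) acc
    = acc ++ (((PySem.List.enumerate ms s).filter (fun p => cond1 p.2)).map (·.1)) := by
  induction ms generalizing acc s with
  | nil => simp [PySem.List.enumerate_nil]
  | cons d tl ih =>
    rw [PySem.List.enumerate_cons, List.foldl_cons, List.filter_cons]
    by_cases hc : cond1 d = true
    · have hc' := hc
      unfold cond1 at hc'
      rw [Bool.and_eq_true] at hc'
      simp only [hc'.1, hc'.2, if_pos, hc]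
      rw [ih]
      simp
    · have hstep : (if (d.getD "Name" "" == "Scizor") = true then
          if (lastSeg (d.getD "Move 1" "") == " Dual Wingbeat.png") = true then acc ++ [s] else acc
        else acc) = acc := by
        unfold cond1 at hc
        cases h1 : (d.getD "Name" "" == "Scizor") <;>
          cases h2 : (lastSeg (d.getD "Move 1" "") == " Dual Wingbeat.png") <;>
          simp_all
      rw [hstep, ih]
      simp [hc]

theorem mid_loop (ms pre : List (PySem.Dict String String)) :
    ((((PySem.List.enumerate ms (pre.length : Int)).filter (fun p => cond1 p.2)).map (·.1)).foldl
      (fun cur i => cur.set i.toNat (scyRw ((PySem.List.pyGet? cur i).getD PySem.Dict.empty)))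
      (pre ++ ms))
    = pre ++ ms.map f1 := by
  induction ms generalizing pre with
  | nil => simp [PySem.List.enumerate_nil]
  | cons d tl ih =>
    rw [PySem.List.enumerate_cons, List.filter_cons]
    by_cases hc : cond1 d = true
    · simp only [hc, if_pos, List.map_cons, List.foldl_cons]
      have hget : (PySem.List.pyGet? (pre ++ d :: tl) (pre.length : Int)).getD PySem.Dict.empty = d := by
        simp
      have hset : (pre ++ d :: tl).set (pre.length : Int).toNat (scyRw d) = (pre ++ [scyRw d]) ++ tl := by
        rw [Int.toNat_natCast, List.set_append]
        simp
      rw [hget, hset]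
      have hlen : ((pre.length : Int) + 1) = ((pre ++ [scyRw d]).length : Int) := by
        simp
      rw [hlen, ih (pre ++ [scyRw d])]
      simp [f1, hc]
    · simp only [hc, if_neg, Bool.false_eq_true, not_false_iff]
      have hlen : ((pre.length : Int) + 1) = ((pre ++ [d]).length : Int) := by simp
      have hsplit : pre ++ d :: tl = (pre ++ [d]) ++ tl := by simp
      rw [hlen, hsplit, ih (pre ++ [d])]
      simp [f1, hc]

theorem snd_loop (ms pre : List (PySem.Dict String String)) :
    ((PySem.List.enumerate ms (pre.length : Int)).foldl (fun cur p =>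
      if p.2.getD "Name" "" == "Urshifu" then
        if lastSeg (p.2.getD "Move 1" "") == " Surging Strikes.png" then
          cur.set p.1.toNat (p.2.insert "Pokemon" ("Pokemon/" ++ "Urshifu_Rapid" ++ ".png"))
        else if lastSeg (p.2.getD "Move 1" "") == " Wicked Blow.png" then
          cur.set p.1.toNat (p.2.insert "Pokemon" ("Pokemon/" ++ "Urshifu_Single" ++ ".png"))
        else cur
      else cur) (pre ++ ms))
    = pre ++ ms.map f2 := by
  induction ms generalizing pre with
  | nil => simp [PySem.List.enumerate_nil]
  | cons d tl ih =>
    rw [PySem.List.enumerate_cons, List.foldl_cons]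
    have hset : ∀ d' : PySem.Dict String String,
        (pre ++ d :: tl).set (pre.length : Int).toNat d' = (pre ++ [d']) ++ tl := by
      intro d'
      rw [Int.toNat_natCast, List.set_append]
      simp
    have step : ∀ d' : PySem.Dict String String, d' = f2 d →
        ((PySem.List.enumerate tl ((pre.length : Int) + 1)).foldl (fun cur p =>
          if p.2.getD "Name" "" == "Urshifu" then
            if lastSeg (p.2.getD "Move 1" "") == " Surging Strikes.png" then
              cur.set p.1.toNat (p.2.insert "Pokemon" ("Pokemon/" ++ "Urshifu_Rapid" ++ ".png"))
            else if lastSeg (p.2.getD "Move 1" "") == " Wicked Blow.png" then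
              cur.set p.1.toNat (p.2.insert "Pokemon" ("Pokemon/" ++ "Urshifu_Single" ++ ".png"))
            else cur
          else cur) ((pre ++ [d']) ++ tl))
        = pre ++ (d :: tl).map f2 := by
      intro d' hd'
      have hlen : ((pre.length : Int) + 1) = (((pre ++ [d']).length : Int)) := by simp
      rw [hlen, ih (pre ++ [d'])]
      simp [hd']
    by_cases h1 : (d.getD "Name" "" == "Urshifu") = true
    · by_cases h2 : (lastSeg (d.getD "Move 1" "") == " Surging Strikes.png") = true
      · simp only [h1, h2, if_pos]
        rw [hset]
        exact step _ (by simp [f2, h1, h2])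
      · by_cases h3 : (lastSeg (d.getD "Move 1" "") == " Wicked Blow.png") = true
        · simp only [h1, h2, h3, if_pos, if_neg, Bool.false_eq_true, not_false_iff]
          rw [hset]
          exact step _ (by simp [f2, h1, h2, h3])
        · simp only [h1, h2, h3, if_pos, if_neg, Bool.false_eq_true, not_false_iff]
          have : pre ++ d :: tl = (pre ++ [d]) ++ tl := by simp
          rw [this]
          exact step _ (by simp [f2, h1, h2, h3])
    · simp only [h1, if_neg, Bool.false_eq_true, not_false_iff]
      have : pre ++ d :: tl = (pre ++ [d]) ++ tl := by simp
      rw [this]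
      exact step _ (by simp [f2, h1])

-- A's composed per-record function agrees with B's table dispatch
theorem fuse (d : PySem.Dict String String) : f2 (f1 d) = bApply d := by
  by_cases hN : d.getD "Name" "" = "Scizor"
  · by_cases hT : lastSeg (d.getD "Move 1" "") = " Dual Wingbeat.png"
    · have hc : cond1 d = true := by simp [cond1, hN, hT]
      simp only [f1, hc, if_pos]
      have hname : (scyRw d).getD "Name" "" = "Scyther" := by
        unfold scyRw; simp [PySem.Dict.getD_insert]
      unfold f2
      rw [if_neg (by simp [hname])]
      unfold bApply
      rw [hN, hT]
      have hget : rulesDict.get? ("Scizor", " Dual Wingbeat.png") = some scytherPatch := by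
        simp [rulesDict, PySem.Dict.ofList, PySem.Dict.update, PySem.Dict.get?_insert]
      rw [hget]
      simp [scytherPatch, scyRw, PySem.Dict.getD_insert]
    · have hc : cond1 d = false := by simp [cond1, hT]
      simp only [f1, hc, Bool.false_eq_true, if_neg, not_false_iff]
      unfold f2
      rw [if_neg (by simp [hN])]
      unfold bApply
      rw [hN]
      have hget : rulesDict.get? ("Scizor", lastSeg (d.getD "Move 1" "")) = none := by
        simp [rulesDict, PySem.Dict.ofList, PySem.Dict.update, PySem.Dict.get?_insert, PySem.Dict.get?_empty, hT]
      rw [hget]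
  · have hc : cond1 d = false := by simp [cond1, hN]
    simp only [f1, hc, Bool.false_eq_true, if_neg, not_false_iff]
    by_cases hU : d.getD "Name" "" = "Urshifu"
    · unfold f2 bApply
      rw [hU]
      by_cases h2 : lastSeg (d.getD "Move 1" "") = " Surging Strikes.png"
      · rw [h2]
        have hget : rulesDict.get? ("Urshifu", " Surging Strikes.png")
            = some (fun _ => [("Pokemon", "Pokemon/Urshifu_Rapid.png")]) := by
          simp [rulesDict, PySem.Dict.ofList, PySem.Dict.update, PySem.Dict.get?_insert]
        rw [hget]
        simp
      · by_cases h3 : lastSeg (d.getD "Move 1" "") = " Wicked Blow.png"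
        · rw [h3]
          have hget : rulesDict.get? ("Urshifu", " Wicked Blow.png")
              = some (fun _ => [("Pokemon", "Pokemon/Urshifu_Single.png")]) := by
            simp [rulesDict, PySem.Dict.ofList, PySem.Dict.update]
          rw [hget]
          simp
        · have hget : rulesDict.get? ("Urshifu", lastSeg (d.getD "Move 1" "")) = none := by
            simp [rulesDict, PySem.Dict.ofList, PySem.Dict.update, PySem.Dict.get?_insert, h2, h3]
          rw [hget]
          simp [h2, h3]
    · unfold f2 bApply
      have hget : rulesDict.get? (d.getD "Name" "", lastSeg (d.getD "Move 1" "")) = none := by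
        simp [rulesDict, PySem.Dict.ofList, PySem.Dict.update, PySem.Dict.get?_insert, hN, hU]
      rw [hget]
      simp [hU]

-- ===== VERDICT (by name: the statement is the Claim_ definition above) =====
theorem fix_scyther_and_urshifu_spec : Claim_equal_fix_scyther_and_urshifu := by
  intro movesets _ _
  unfold Spec_fix_scyther_and_urshifu
  simp only [fix_scyther_and_urshifu, fix_scyther_and_urshifu_alt]
  have h1 := indices_closed (movesets.map PySem.Dict.ofList) [] 0
  simp only [List.nil_append] at h1
  rw [h1]
  have h2 := mid_loop (movesets.map PySem.Dict.ofList) []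
  simp only [List.nil_append, List.length_nil, Nat.cast_zero] at h2
  rw [h2]
  have h3 := snd_loop ((movesets.map PySem.Dict.ofList).map f1) []
  simp only [List.nil_append, List.length_nil, Nat.cast_zero] at h3
  rw [h3]
  simp only [List.map_map]
  exact List.map_congr_left (fun l _ => by simp [Function.comp, fuse])
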